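-- pv_equiv track=rewrite | github.com/rocxxxx/RTSmart-Security-Rescue | All_code/audio.py | moving_average_filter
-- ===== SOURCE A (Python) =====
-- def moving_average_filter(samples, window_size=5):
--     filtered = []
--     length = len(samples)
--     for i in range(length):
--         total = 0
--         count = 0
--         for j in range(i - window_size // 2, i + window_size // 2 + 1):
--             if 0 <= j < length:
--                 total += samples[j]
--                 count += 1
--         filtered.append(total // count)
--     return filtered
-- ===== SOURCE B (Python) =====
-- def moving_average_filter(samples, window_size=5):
--     # Prefix-sum re-implementation: O(n) instead of O(n * window_size).
--     n = len(samples)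
--     half = window_size // 2
--     prefix = [0]
--     for x in samples:
--         prefix.append(prefix[-1] + x)
--     out = []
--     for i in range(n):
--         lo = max(0, i - half)
--         hi = min(n, i + half + 1)
--         out.append((prefix[hi] - prefix[lo]) // (hi - lo))
--     return out
-- ===== Notes on version B (the rewrite author's own statement) =====
-- stated objective: faster
-- what changed: Replaces the O(window_size) inner scan per sample with a prefix-sum array, so each window's total and count come from O(1) arithmetic on clamped indices.
import Mathlib
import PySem

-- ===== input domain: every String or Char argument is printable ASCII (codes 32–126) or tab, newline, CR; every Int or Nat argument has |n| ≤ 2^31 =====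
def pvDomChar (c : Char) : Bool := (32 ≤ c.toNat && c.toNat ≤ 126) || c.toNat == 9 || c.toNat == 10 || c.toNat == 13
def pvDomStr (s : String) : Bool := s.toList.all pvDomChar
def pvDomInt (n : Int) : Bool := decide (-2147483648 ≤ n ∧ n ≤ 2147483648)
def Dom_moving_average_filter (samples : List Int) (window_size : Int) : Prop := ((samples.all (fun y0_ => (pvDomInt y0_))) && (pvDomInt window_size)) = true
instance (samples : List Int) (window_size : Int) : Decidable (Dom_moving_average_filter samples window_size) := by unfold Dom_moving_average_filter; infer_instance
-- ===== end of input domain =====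

-- B replaces A's O(window_size) inner scan per sample by a prefix-sum array with
-- O(1) arithmetic per window (clamped indices); return values agree on Pre_.

-- ===== PORT A =====
def moving_average_filter (samples : List Int) (window_size : Int) : List Int :=
  let length : Int := samples.length
  (PySem.List.pyRange 0 length 1).foldl
    (fun filtered i =>
      let tc := (PySem.List.pyRange (i - PySem.Int.floordiv window_size 2)
                  (i + PySem.Int.floordiv window_size 2 + 1) 1).foldl
        (fun (tc : Int × Int) j =>
          if 0 ≤ j ∧ j < length then (tc.1 + PySem.List.pyGetD samples j 0, tc.2 + 1) else tc)
        (0, 0)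
      filtered ++ [PySem.Int.floordiv tc.1 tc.2]) []

-- ===== PORT B =====
def moving_average_filter_alt (samples : List Int) (window_size : Int) : List Int :=
  let n : Int := samples.length
  let half : Int := PySem.Int.floordiv window_size 2
  let pre : List Int :=
    samples.foldl (fun acc x => acc ++ [PySem.List.pyGetD acc (-1) 0 + x]) [(0 : Int)]
  (PySem.List.pyRange 0 n 1).foldl
    (fun out i =>
      let lo := max 0 (i - half)
      let hi := min n (i + half + 1)
      out ++ [PySem.Int.floordiv
        (PySem.List.pyGetD pre hi 0 - PySem.List.pyGetD pre lo 0) (hi - lo)]) []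

-- ===== PRECONDITION & SPEC =====
-- A raises ZeroDivisionError when window_size < 0 and samples ≠ [] (the window is empty, count = 0);
-- Pre_ excludes exactly those inputs.
def Pre_moving_average_filter (samples : List Int) (window_size : Int) : Prop :=
  samples = [] ∨ 0 ≤ window_size
instance (samples : List Int) (window_size : Int) : Decidable (Pre_moving_average_filter samples window_size) := by unfold Pre_moving_average_filter; infer_instance
def pvWitness_moving_average_filter : List Int × Int := ([1, 2, 3, 10], 5)
def Spec_moving_average_filter (samples : List Int) (window_size : Int) (out : List Int) : Prop := out = moving_average_filter_alt samples window_size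
instance (samples : List Int) (window_size : Int) (out : List Int) : Decidable (Spec_moving_average_filter samples window_size out) := by unfold Spec_moving_average_filter; infer_instance

-- ===== CLAIM (what is proved, stated in full; the proofs are below) =====
def Claim_equal_moving_average_filter : Prop := ∀ (samples : List Int) (window_size : Int), Dom_moving_average_filter samples window_size → Pre_moving_average_filter samples window_size → Spec_moving_average_filter samples window_size (moving_average_filter samples window_size)

-- ===== LEMMAS AND PROOFS =====

-- The prefix list B builds is [sum of first k samples | k = 0..n].
lemma maf_prefix_eq (l : List Int) :
    l.foldl (fun acc x => acc ++ [PySem.List.pyGetD acc (-1) 0 + x]) [(0 : Int)]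
      = (List.range (l.length + 1)).map (fun k => ((l.take k).sum : Int)) := by
  induction l using List.reverseRecOn with
  | nil => simp
  | append_singleton l x ih =>
    rw [List.foldl_append, ih]
    simp only [List.foldl_cons, List.foldl_nil]
    have hlast : PySem.List.pyGetD
        ((List.range (l.length + 1)).map (fun k => ((l.take k).sum : Int))) (-1) 0 = l.sum := by
      rw [List.range_succ, List.map_append, List.map_singleton,
        PySem.List.pyGetD_neg_one_append_singleton, List.take_of_length_le (le_refl _)]
    rw [hlast, List.length_append, List.length_singleton]
    conv_rhs => rw [List.range_succ, List.map_append, List.map_singleton]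
    congr 1
    · apply List.map_congr_left
      intro k hk
      rw [List.mem_range] at hk
      rw [List.take_append_of_le_length (by omega)]
    · rw [List.take_of_length_le (by simp), List.sum_append, List.sum_singleton]

-- Indexing the prefix list at 0 ≤ k ≤ n gives the sum of the first k samples.
lemma maf_prefix_get (l : List Int) (k : Int) (h0 : 0 ≤ k) (h1 : k ≤ (l.length : Int)) :
    PySem.List.pyGetD ((List.range (l.length + 1)).map (fun k => ((l.take k).sum : Int))) k 0
      = (l.take k.toNat).sum := by
  rw [PySem.List.pyGetD_eq_getElem _ 0 h0 (by simp; omega)]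
  simp

-- A's inner guarded window loop computes the clamped-interval sum and its length.
lemma maf_win_spec (l : List Int) (k : Nat) : ∀ (a t c : Int),
    (PySem.List.pyRange a (a + (k : Int)) 1).foldl
      (fun (tc : Int × Int) j =>
        if 0 ≤ j ∧ j < (l.length : Int) then (tc.1 + PySem.List.pyGetD l j 0, tc.2 + 1) else tc)
      (t, c)
    = (t + ((l.take (min (l.length : Int) (a + k)).toNat).sum
            - (l.take (max 0 a).toNat).sum),
       c + max 0 (min (l.length : Int) (a + k) - max 0 a)) := by
  induction k with
  | zero =>
    intro a t c
    rw [PySem.List.pyRange_one_eq_nil (by omega)]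
    simp only [List.foldl_nil, Nat.cast_zero, add_zero]
    have hsum : (l.take (min (l.length : Int) a).toNat).sum = (l.take (max 0 a).toNat).sum := by
      rcases (by omega : a ≤ 0 ∨ (0 < a ∧ a ≤ (l.length : Int)) ∨ (l.length : Int) < a)
        with ha | ha | ha
      · have h1 : (min (l.length : Int) a).toNat = 0 := by omega
        have h2 : (max 0 a).toNat = 0 := by omega
        rw [h1, h2]
      · have : min (l.length : Int) a = max 0 a := by omega
        rw [this]
      · have h1 : (min (l.length : Int) a).toNat = l.length := by omega
        have h2 : l.length ≤ (max 0 a).toNat := by omega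
        rw [h1, List.take_of_length_le (le_refl _), List.take_of_length_le h2]
    have hcnt : max 0 (min (l.length : Int) a - max 0 a) = 0 := by omega
    rw [hsum, hcnt]
    simp
  | succ k ih =>
    intro a t c
    have hc : a + ((k + 1 : Nat) : Int) = (a + 1) + (k : Int) := by push_cast; ring
    rw [hc, PySem.List.pyRange_one_cons (by omega)]
    simp only [List.foldl_cons]
    by_cases hin : 0 ≤ a ∧ a < (l.length : Int)
    · rw [if_pos hin]
      rw [ih (a + 1) (t + PySem.List.pyGetD l a 0) (c + 1)]
      have hidx : PySem.List.pyGetD l a 0 = l[a.toNat]'(by omega) :=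
        PySem.List.pyGetD_eq_getElem l 0 hin.1 hin.2
      have hstep : (l.take (a.toNat + 1)).sum = (l.take a.toNat).sum + l[a.toNat]'(by omega) :=
        List.sum_take_succ _ _ _
      have hmx1 : (max 0 (a + 1)).toNat = a.toNat + 1 := by omega
      have hmx0 : (max 0 a).toNat = a.toNat := by omega
      rw [Prod.mk.injEq]
      constructor
      · rw [hmx1, hmx0, hidx, hstep]
        omega
      · omega
    · rw [if_neg hin]
      rw [ih (a + 1) t c]
      have hsum : (l.take (max 0 (a + 1)).toNat).sum = (l.take (max 0 a).toNat).sum := by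
        rcases (by omega : a < 0 ∨ (l.length : Int) ≤ a) with ha | ha
        · have h1 : (max 0 (a + 1)).toNat = 0 := by omega
          have h2 : (max 0 a).toNat = 0 := by omega
          rw [h1, h2]
        · have h1 : l.length ≤ (max 0 (a + 1)).toNat := by omega
          have h2 : l.length ≤ (max 0 a).toNat := by omega
          rw [List.take_of_length_le h1, List.take_of_length_le h2]
      rw [Prod.mk.injEq]
      constructor
      · rw [hsum]
      · omega

-- ===== VERDICT (by name: the statement is the Claim_ definition above) =====
theorem moving_average_filter_spec : Claim_equal_moving_average_filter := by
  intro samples window_size _ hpre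
  unfold Spec_moving_average_filter moving_average_filter moving_average_filter_alt
  simp only []
  rw [PySem.List.foldl_append_singleton_eq_map, PySem.List.foldl_append_singleton_eq_map]
  simp only [List.nil_append]
  apply List.map_congr_left
  intro i hi
  have hmem := PySem.List.mem_pyRange_one.1 hi
  obtain ⟨h0i, hin⟩ := hmem
  have hne : samples ≠ [] := by
    intro h; subst h; simp at hin; omega
  have hw : 0 ≤ window_size := hpre.resolve_left hne
  have hhalf : 0 ≤ PySem.Int.floordiv window_size 2 := by
    rw [PySem.Int.floordiv_eq_ediv_of_pos (by omega)]
    exact Int.ediv_nonneg hw (by omega)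
  set h : Int := PySem.Int.floordiv window_size 2 with hh
  have hk : i + h + 1 = (i - h) + (((2 * h + 1).toNat : Nat) : Int) := by omega
  rw [hk, maf_win_spec samples (2 * h + 1).toNat (i - h) 0 0]
  rw [maf_prefix_eq samples]
  have hb : (i - h) + (((2 * h + 1).toNat : Nat) : Int) = i + h + 1 := by omega
  rw [hb]
  set lo : Int := max 0 (i - h) with hlo
  set hi' : Int := min (samples.length : Int) (i + h + 1) with hhi
  have hlo0 : 0 ≤ lo := by omega
  have hloLe : lo ≤ (samples.length : Int) := by omega
  have hhi0 : 0 ≤ hi' := by omega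
  have hhiLe : hi' ≤ (samples.length : Int) := by omega
  rw [maf_prefix_get samples hi' hhi0 hhiLe, maf_prefix_get samples lo hlo0 hloLe]
  have hcnt : max 0 (hi' - lo) = hi' - lo := by omega
  rw [hcnt]
  simp
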